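-- pv_equiv track=rewrite | github.com/teerev/llmch-demo | ascii_art/pgm.py | _tokenize_pgm_ascii
-- ===== SOURCE A (Python) =====
-- from typing import List, Tuple
--
-- def _tokenize_pgm_ascii(data: str) -> List[str]:
--     """Tokenize PGM ASCII content, removing comments.
--
--     PGM comments start with '#' and continue to end of line.
--     """
--     tokens: List[str] = []
--     for line in data.splitlines():
--         if "#" in line:
--             line = line.split("#", 1)[0]
--         line = line.strip()
--         if not line:
--             continue
--         tokens.extend(line.split())
--     return tokens
-- ===== SOURCE B (Python) =====
-- from typing import List
--
-- def _tokenize_pgm_ascii(data: str) -> List[str]: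
--     """Tokenize PGM ASCII content, removing comments.
--
--     Single pass over the characters with a comment flag and a token buffer:
--     '#' flushes the buffer and enters comment mode (until end of line),
--     whitespace flushes the buffer, any other character extends it.
--     """
--     tokens: List[str] = []
--     buf: List[str] = []
--     in_comment = False
--     for c in data:
--         if in_comment:
--             if c in "\n\r":
--                 in_comment = False
--         elif c == "#":
--             if buf:
--                 tokens.append("".join(buf))
--                 buf = []
--             in_comment = True
--         elif c.isspace():
--             if buf:
--                 tokens.append("".join(buf))
--                 buf = []
--         else:
--             buf.append(c)
--     if buf:
--         tokens.append("".join(buf))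
--     return tokens
-- ===== Notes on version B (the rewrite author's own statement) =====
-- stated objective: alternative
-- what changed: Replaces A's line-oriented pipeline (splitlines, per-line comment cut, strip, whitespace split, extend) with a single-pass character-level state machine that scans the text once, carrying a comment flag and a token buffer: a comment marker flushes the buffer and enters comment mode until end of line, whitespace flushes the buffer, any other character extends it.
import Mathlib
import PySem

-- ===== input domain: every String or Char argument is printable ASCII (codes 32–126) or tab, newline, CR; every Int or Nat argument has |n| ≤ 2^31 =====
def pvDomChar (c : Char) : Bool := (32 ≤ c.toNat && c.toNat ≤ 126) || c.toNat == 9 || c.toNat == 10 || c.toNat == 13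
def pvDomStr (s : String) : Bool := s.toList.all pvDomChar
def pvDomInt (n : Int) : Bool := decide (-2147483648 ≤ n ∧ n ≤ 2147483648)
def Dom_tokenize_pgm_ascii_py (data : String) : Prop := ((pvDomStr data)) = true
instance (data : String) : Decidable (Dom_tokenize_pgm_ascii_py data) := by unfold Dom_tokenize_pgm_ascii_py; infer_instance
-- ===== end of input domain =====

-- B replaces A's line-oriented pipeline (splitlines + per-line comment cut + strip + split + extend)
-- by a single-pass character-level state machine (comment flag + token buffer); objective: alternative.

-- ===== PORT A =====
def tokenize_pgm_ascii_py (data : String) : List String :=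
  (PySem.Str.splitlines data).foldl
    (fun tokens line =>
      -- line.split("#", 1)[0]: split with a nonempty separator always returns
      -- a nonempty list, so the [0] is total (headD)
      let line1 := if PySem.Str.isIn "#" line then ((PySem.Str.splitMax? line "#" 1).getD []).headD "" else line
      let line2 := PySem.Str.strip line1
      if line2 = "" then tokens
      else tokens ++ PySem.Str.split₀ line2)
    []

-- ===== PORT B =====
-- single pass: for c in data — state (tokens, buf, in_comment); final flush of buf
def tokenize_pgm_ascii_py_alt (data : String) : List String :=
  let st := data.toList.foldl
    (fun (st : List String × List Char × Bool) c =>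
      let tokens := st.1
      let buf := st.2.1
      let inComment := st.2.2
      if inComment then
        if c = '\n' ∨ c = '\r' then (tokens, buf, false) else (tokens, buf, true)
      else if c = '#' then
        ((if buf.isEmpty then tokens else tokens ++ [String.ofList buf]), [], true)
      else if PySem.Chars.isspace c then
        ((if buf.isEmpty then tokens else tokens ++ [String.ofList buf]), [], false)
      else (tokens, buf ++ [c], inComment))
    ([], [], false)
  if st.2.1.isEmpty then st.1 else st.1 ++ [String.ofList st.2.1]

-- ===== PRECONDITION & SPEC =====
def Spec_tokenize_pgm_ascii_py (data : String) (out : List String) : Prop := out = tokenize_pgm_ascii_py_alt data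
instance (data : String) (out : List String) : Decidable (Spec_tokenize_pgm_ascii_py data out) := by unfold Spec_tokenize_pgm_ascii_py; infer_instance

-- ===== CLAIM (what is proved, stated in full; the proofs are below) =====
def Claim_equal_tokenize_pgm_ascii_py : Prop := ∀ (data : String), Dom_tokenize_pgm_ascii_py data → Spec_tokenize_pgm_ascii_py data (tokenize_pgm_ascii_py data)

-- ===== LEMMAS AND PROOFS =====

-- the comment-stripped fragment of one line, on the List Char level
def pvFrag (line : List Char) : List Char :=
  ((PySem.Chars.splitMax? line ['#'] 1).getD []).headD []

-- A's loop body, on the List Char level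
def pvCharsStep (toks : List (List Char)) (line : List Char) : List (List Char) :=
  let line1 := if PySem.Chars.isIn ['#'] line then pvFrag line else line
  let line2 := PySem.Chars.strip line1
  if line2 = [] then toks else toks ++ PySem.Chars.split₀ line2

def pvCharsA (s : List Char) : List (List Char) :=
  (PySem.Chars.splitlines s).foldl pvCharsStep []

-- comment stripping, on the List Char level: drop '#'‥end-of-line, keep the line break
mutual
def pvSC : List Char → List Char
  | [] => []
  | c :: rest => if c = '#' then pvSCC rest else c :: pvSC rest
def pvSCC : List Char → List Char
  | [] => []
  | c :: rest => if c = '\n' ∨ c = '\r' then c :: pvSC rest else pvSCC rest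
end

-- B's state machine, on the List Char level (recursive form of the fold + final flush)
def pvFlush (toks : List (List Char)) (buf : List Char) : List (List Char) :=
  if buf.isEmpty then toks else toks ++ [buf]

def pvDFA : List (List Char) → List Char → Bool → List Char → List (List Char)
  | toks, buf, _, [] => pvFlush toks buf
  | toks, buf, true, c :: rest =>
      if c = '\n' ∨ c = '\r' then pvDFA toks buf false rest else pvDFA toks buf true rest
  | toks, buf, false, c :: rest =>
      if c = '#' then pvDFA (pvFlush toks buf) [] true rest
      else if PySem.Chars.isspace c then pvDFA (pvFlush toks buf) [] false rest
      else pvDFA toks (buf ++ [c]) false rest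

-- ---- one-step unfoldings (definitional) ----

theorem pv_go_nil (cur : List Char) (acc : List (List Char)) :
    PySem.Chars.split₀.go [] cur acc =
      if cur.isEmpty then acc.reverse else (cur.reverse :: acc).reverse := rfl

theorem pv_go_cons (c : Char) (rest cur : List Char) (acc : List (List Char)) :
    PySem.Chars.split₀.go (c :: rest) cur acc =
      if PySem.Chars.isspace c then
        (if cur.isEmpty then PySem.Chars.split₀.go rest [] acc
         else PySem.Chars.split₀.go rest [] (cur.reverse :: acc))
      else PySem.Chars.split₀.go rest (c :: cur) acc := rfl

theorem pv_sgo_succ_cons (sep : List Char) (fuel m : Nat) (c : Char) (rest cur : List Char)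
    (acc : List (List Char)) :
    PySem.Chars.splitOnMax.go sep (fuel+1) m (c :: rest) cur acc =
      if m = 0 then ((cur.reverse ++ (c :: rest)) :: acc).reverse
      else if sep.isPrefixOf (c :: rest) then
        PySem.Chars.splitOnMax.go sep fuel (m-1) (List.drop sep.length (c :: rest)) [] (cur.reverse :: acc)
      else PySem.Chars.splitOnMax.go sep fuel m rest (c :: cur) acc := rfl

-- ---- split₀.go facts ----

theorem pv_go_acc (s : List Char) : ∀ (cur : List Char) (acc : List (List Char)),
    PySem.Chars.split₀.go s cur acc = acc.reverse ++ PySem.Chars.split₀.go s cur [] := by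
  induction s with
  | nil => intro cur acc; by_cases h : cur.isEmpty <;> simp [pv_go_nil, h]
  | cons c rest ih =>
    intro cur acc
    rw [pv_go_cons, pv_go_cons]
    by_cases hs : PySem.Chars.isspace c
    · by_cases h : cur.isEmpty
      · simp only [hs, h, if_true]
        exact ih [] acc
      · simp only [hs, h, if_true, if_false, Bool.false_eq_true]
        rw [ih [] (cur.reverse :: acc), ih [] [cur.reverse]]
        simp
    · simp only [hs, Bool.false_eq_true, if_false]
      exact ih _ _

theorem pv_go_ws_last (c : Char) (hc : PySem.Chars.isspace c = true) (x : List Char) :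
    ∀ (cur : List Char) (acc : List (List Char)),
    PySem.Chars.split₀.go (x ++ [c]) cur acc = PySem.Chars.split₀.go x cur acc := by
  induction x with
  | nil =>
    intro cur acc
    by_cases h : cur.isEmpty <;> simp [pv_go_cons, pv_go_nil, hc, h]
  | cons d rest ih =>
    intro cur acc
    rw [List.cons_append, pv_go_cons, pv_go_cons]
    by_cases hd : PySem.Chars.isspace d
    · by_cases h : cur.isEmpty <;> simp [hd, h, ih]
    · simp [hd, ih]

theorem pv_go_seam (w : Char) (hw : PySem.Chars.isspace w = true) (b : List Char) :
    ∀ (a cur : List Char) (acc : List (List Char)),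
    PySem.Chars.split₀.go (a ++ w :: b) cur acc =
      PySem.Chars.split₀.go a cur acc ++ PySem.Chars.split₀.go b [] [] := by
  intro a
  induction a with
  | nil =>
    intro cur acc
    rw [List.nil_append, pv_go_cons, pv_go_nil, if_pos hw]
    by_cases h : cur.isEmpty = true
    · rw [if_pos h, if_pos h]
      exact pv_go_acc b [] acc
    · rw [if_neg h, if_neg h, pv_go_acc b [] (cur.reverse :: acc)]
  | cons c rest ih =>
    intro cur acc
    rw [List.cons_append, pv_go_cons, pv_go_cons]
    by_cases hs : PySem.Chars.isspace c
    · by_cases h : cur.isEmpty <;> simp [hs, h, ih]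
    · simp [hs, ih]

theorem pv_split₀_ws_cons (c : Char) (hc : PySem.Chars.isspace c = true) (x : List Char) :
    PySem.Chars.split₀ (c :: x) = PySem.Chars.split₀ x := by
  simp [PySem.Chars.split₀, pv_go_cons, hc]

theorem pv_split₀_ws_snoc (c : Char) (hc : PySem.Chars.isspace c = true) (x : List Char) :
    PySem.Chars.split₀ (x ++ [c]) = PySem.Chars.split₀ x := by
  simp [PySem.Chars.split₀, pv_go_ws_last c hc]

theorem pv_split₀_seam (w : Char) (hw : PySem.Chars.isspace w = true) (a b : List Char) :
    PySem.Chars.split₀ (a ++ w :: b) = PySem.Chars.split₀ a ++ PySem.Chars.split₀ b := by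
  simp [PySem.Chars.split₀, pv_go_seam w hw]

-- ---- split₀ ignores stripping ----

theorem pv_split₀_lstrip (x : List Char) :
    PySem.Chars.split₀ (PySem.Chars.lstrip x) = PySem.Chars.split₀ x := by
  induction x with
  | nil => rfl
  | cons c rest ih =>
    by_cases hc : PySem.Chars.isspace c
    · rw [pv_split₀_ws_cons c hc, ← ih]
      simp [PySem.Chars.lstrip, hc]
    · simp [PySem.Chars.lstrip, hc]

theorem pv_split₀_rstrip (x : List Char) :
    PySem.Chars.split₀ (PySem.Chars.rstrip x) = PySem.Chars.split₀ x := by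
  have hx := congrArg List.reverse
    (List.takeWhile_append_dropWhile (p := PySem.Chars.isspace) (l := x.reverse))
  rw [List.reverse_append, List.reverse_reverse] at hx
  have hws : ∀ c ∈ (x.reverse.takeWhile PySem.Chars.isspace).reverse, PySem.Chars.isspace c = true := by
    intro c hc
    exact List.mem_takeWhile_imp (List.mem_reverse.mp hc)
  conv_rhs => rw [← hx]
  rw [PySem.Chars.rstrip]
  generalize (x.reverse.takeWhile PySem.Chars.isspace).reverse = t at hws
  induction t using List.reverseRecOn with
  | nil => simp
  | append_singleton t c iht =>
    rw [← List.append_assoc, pv_split₀_ws_snoc c (hws c (by simp))]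
    exact iht (fun d hd => hws d (by simp [hd]))

theorem pv_split₀_strip (x : List Char) :
    PySem.Chars.split₀ (PySem.Chars.strip x) = PySem.Chars.split₀ x := by
  rw [PySem.Chars.strip, pv_split₀_rstrip, pv_split₀_lstrip]

-- ---- pvFrag = takeWhile (· ≠ '#') ----

theorem pv_splitOnMax_go_no_hash (fuel : Nat) :
    ∀ (s cur : List Char) (acc : List (List Char)), '#' ∉ s →
    PySem.Chars.splitOnMax.go ['#'] fuel 1 s cur acc = ((cur.reverse ++ s) :: acc).reverse := by
  induction fuel with
  | zero => intro s cur acc _; rfl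
  | succ fuel ih =>
    intro s cur acc hs
    cases s with
    | nil =>
      rw [show PySem.Chars.splitOnMax.go ['#'] (fuel+1) 1 [] cur acc = (cur.reverse :: acc).reverse from rfl]
      simp
    | cons c rest =>
      have hc : c ≠ '#' := fun h => hs (h ▸ List.mem_cons_self)
      have hpre : List.isPrefixOf ['#'] (c :: rest) = false := by
        simp [List.isPrefixOf, Ne.symm hc]
      rw [pv_sgo_succ_cons, if_neg (by omega), hpre]
      rw [if_neg (by simp), ih rest (c :: cur) acc (fun h => hs (List.mem_cons_of_mem c h))]
      simp

theorem pv_frag_no_hash (line : List Char) (h : PySem.Chars.isIn ['#'] line = false) :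
    pvFrag line = line := by
  have hmem : '#' ∉ line := by
    intro hm
    obtain ⟨s, t, rfl⟩ := List.append_of_mem hm
    have hinf : ['#'] <:+: s ++ '#' :: t := ⟨s, t, by simp⟩
    rw [← PySem.Chars.isIn_iff_infix, h] at hinf
    exact Bool.false_ne_true hinf
  have h1 : PySem.Chars.splitMax? line ['#'] 1 = some (PySem.Chars.splitOnMax line ['#'] 1) := by
    simp [PySem.Chars.splitMax?]
  have h2 : PySem.Chars.splitOnMax line ['#'] 1 = [line] := by
    rw [PySem.Chars.splitOnMax, if_neg (by omega)]
    rw [show ((1 : Int).toNat) = 1 from rfl,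
      pv_splitOnMax_go_no_hash _ _ _ _ hmem]
    rfl
  simp [pvFrag, h1, h2]

-- m = 0: the whole remainder is the last piece
theorem pv_sgo_zero (sep : List Char) (fuel : Nat) (s cur : List Char) (acc : List (List Char)) :
    PySem.Chars.splitOnMax.go sep fuel 0 s cur acc = ((cur.reverse ++ s) :: acc).reverse := by
  cases fuel with
  | zero => rfl
  | succ fuel =>
    cases s with
    | nil => simp [show PySem.Chars.splitOnMax.go sep (fuel+1) 0 [] cur acc = (cur.reverse :: acc).reverse from rfl]
    | cons c rest => rw [pv_sgo_succ_cons, if_pos rfl]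

theorem pv_sgo_hash (a : List Char) : ∀ (fuel : Nat) (b cur : List Char) (acc : List (List Char)),
    '#' ∉ a →
    PySem.Chars.splitOnMax.go ['#'] (a.length + fuel + 1) 1 (a ++ '#' :: b) cur acc =
      acc.reverse ++ [cur.reverse ++ a, b] := by
  induction a with
  | nil =>
    intro fuel b cur acc _
    rw [List.nil_append, show ([] : List Char).length + fuel + 1 = fuel + 1 from by simp,
      pv_sgo_succ_cons, if_neg (by omega), if_pos (by simp [List.isPrefixOf])]
    simp [pv_sgo_zero]
  | cons c a' ih =>
    intro fuel b cur acc hn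
    have hc : c ≠ '#' := fun h => hn (h ▸ List.mem_cons_self)
    rw [show (c :: a').length + fuel + 1 = (a'.length + fuel + 1) + 1 from by simp; omega,
      List.cons_append, pv_sgo_succ_cons, if_neg (by omega),
      if_neg (by simp [List.isPrefixOf, Ne.symm hc]),
      ih fuel b (c :: cur) acc (fun h => hn (List.mem_cons_of_mem c h))]
    simp

theorem pv_hash_split (line : List Char) (hmem : '#' ∈ line) :
    ∃ a b, line = a ++ '#' :: b ∧ '#' ∉ a := by
  induction line with
  | nil => simp at hmem
  | cons c rest ih =>
    by_cases hc : c = '#'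
    · exact ⟨[], rest, by rw [hc]; rfl, by simp⟩
    · have hm : '#' ∈ rest := by
        rcases List.mem_cons.mp hmem with h | h
        · exact absurd h.symm hc
        · exact h
      obtain ⟨a, b, rfl, ha⟩ := ih hm
      refine ⟨c :: a, b, rfl, ?_⟩
      intro h
      rcases List.mem_cons.mp h with h | h
      · exact hc h.symm
      · exact ha h

theorem pv_frag_takeWhile (line : List Char) :
    pvFrag line = line.takeWhile (· ≠ '#') := by
  by_cases hin : PySem.Chars.isIn ['#'] line
  · have hmem : '#' ∈ line := by
      rcases (PySem.Chars.isIn_iff_infix (sub := ['#']) (s := line)).mp hin with ⟨s, t, rfl⟩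
      simp
    obtain ⟨a, b, rfl, ha⟩ := pv_hash_split line hmem
    have h1 : PySem.Chars.splitMax? (a ++ '#' :: b) ['#'] 1
        = some (PySem.Chars.splitOnMax (a ++ '#' :: b) ['#'] 1) := by
      simp [PySem.Chars.splitMax?]
    have hfuel : (a ++ '#' :: b).length + 1 = a.length + (b.length + 1) + 1 := by simp
    have h2 : PySem.Chars.splitOnMax (a ++ '#' :: b) ['#'] 1 = [a, b] := by
      rw [PySem.Chars.splitOnMax, if_neg (by omega), show ((1 : Int).toNat) = 1 from rfl, hfuel,
        pv_sgo_hash a (b.length + 1) b [] [] ha]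
      simp
    have htw : (a ++ '#' :: b).takeWhile (· ≠ '#') = a := by
      rw [List.takeWhile_append_of_pos]
      · simp
      · intro c hc; simp; exact fun h => ha (h ▸ hc)
    rw [pvFrag, h1, htw]
    simp [h2]
  · rw [pv_frag_no_hash line (by simpa using hin)]
    have hmem : '#' ∉ line := by
      intro hm
      obtain ⟨s, t, rfl⟩ := List.append_of_mem hm
      have hinf : ['#'] <:+: s ++ '#' :: t := ⟨s, t, by simp⟩
      rw [← PySem.Chars.isIn_iff_infix] at hinf
      simp [hinf] at hin
    rw [List.takeWhile_eq_self_iff.mpr]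
    intro c hc
    simp
    exact fun h => hmem (h ▸ hc)

-- ---- per-line contribution and the fold (A side) ----

theorem pv_step_eq (toks : List (List Char)) (line : List Char) :
    pvCharsStep toks line = toks ++ PySem.Chars.split₀ (pvFrag line) := by
  have key : ∀ l : List Char,
      (if PySem.Chars.strip l = [] then toks else toks ++ PySem.Chars.split₀ (PySem.Chars.strip l))
        = toks ++ PySem.Chars.split₀ l := by
    intro l
    by_cases h : PySem.Chars.strip l = []
    · have h0 : PySem.Chars.split₀ l = [] := by rw [← pv_split₀_strip, h]; rfl
      simp [h, h0]
    · rw [if_neg h, pv_split₀_strip]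
  by_cases hin : PySem.Chars.isIn ['#'] line
  · simpa [pvCharsStep, hin] using key (pvFrag line)
  · have hf : pvFrag line = line := pv_frag_no_hash line (by simpa using hin)
    rw [hf]
    simpa [pvCharsStep, hin] using key line

theorem pv_foldA (ls : List (List Char)) : ∀ (toks : List (List Char)),
    ls.foldl pvCharsStep toks = toks ++ ls.flatMap (fun line => PySem.Chars.split₀ (pvFrag line)) := by
  induction ls with
  | nil => simp
  | cons l ls ih =>
    intro toks
    rw [List.foldl_cons, pv_step_eq, ih, List.flatMap_cons, List.append_assoc]

-- ---- pvSC facts ----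

theorem pv_scc_breakfree (l : List Char) (h1 : '\n' ∉ l) (h2 : '\r' ∉ l) : pvSCC l = [] := by
  induction l with
  | nil => rfl
  | cons c rest ih =>
    rw [pvSCC, if_neg]
    · exact ih (fun h => h1 (List.mem_cons_of_mem c h)) (fun h => h2 (List.mem_cons_of_mem c h))
    · rintro (rfl | rfl)
      · exact h1 List.mem_cons_self
      · exact h2 List.mem_cons_self

theorem pv_sc_breakfree (l : List Char) (h1 : '\n' ∉ l) (h2 : '\r' ∉ l) :
    pvSC l = l.takeWhile (· ≠ '#') := by
  induction l with
  | nil => rfl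
  | cons c rest ih =>
    by_cases hc : c = '#'
    · subst hc
      rw [pvSC, if_pos rfl,
        pv_scc_breakfree rest (fun h => h1 (List.mem_cons_of_mem _ h)) (fun h => h2 (List.mem_cons_of_mem _ h))]
      simp [List.takeWhile]
    · rw [pvSC, if_neg hc, ih (fun h => h1 (List.mem_cons_of_mem c h)) (fun h => h2 (List.mem_cons_of_mem c h))]
      simp [hc]

theorem pv_scc_line (l : List Char) (h1 : '\n' ∉ l) (h2 : '\r' ∉ l) (nl : Char)
    (hnl : nl = '\n' ∨ nl = '\r') (rest : List Char) :
    pvSCC (l ++ nl :: rest) = nl :: pvSC rest := by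
  induction l with
  | nil => rw [List.nil_append, pvSCC, if_pos hnl]
  | cons c l' ih =>
    rw [List.cons_append, pvSCC, if_neg]
    · exact ih (fun h => h1 (List.mem_cons_of_mem c h)) (fun h => h2 (List.mem_cons_of_mem c h))
    · rintro (rfl | rfl)
      · exact h1 List.mem_cons_self
      · exact h2 List.mem_cons_self

theorem pv_sc_line (l : List Char) (h1 : '\n' ∉ l) (h2 : '\r' ∉ l) (nl : Char)
    (hnl : nl = '\n' ∨ nl = '\r') (rest : List Char) :
    pvSC (l ++ nl :: rest) = l.takeWhile (· ≠ '#') ++ nl :: pvSC rest := by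
  induction l with
  | nil =>
    rw [List.nil_append, pvSC, if_neg]
    · simp
    · rintro rfl; rcases hnl with h | h <;> simp at h
  | cons c l' ih =>
    by_cases hc : c = '#'
    · subst hc
      rw [List.cons_append, pvSC, if_pos rfl,
        pv_scc_line l' (fun h => h1 (List.mem_cons_of_mem _ h)) (fun h => h2 (List.mem_cons_of_mem _ h)) nl hnl rest]
      simp [List.takeWhile]
    · rw [List.cons_append, pvSC, if_neg hc,
        ih (fun h => h1 (List.mem_cons_of_mem c h)) (fun h => h2 (List.mem_cons_of_mem c h))]
      simp [hc]

-- ---- the A side equals split₀ ∘ pvSC (on the domain) ----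

def pvIsB (c : Char) : Bool :=
  have n := c.toNat
  decide (n = 10) || decide (n = 13) || decide (n = 11) || decide (n = 12) || decide (n = 28) ||
    decide (n = 29) || decide (n = 30) || decide (n = 133) || decide (n = 8232) || decide (n = 8233)

theorem pv_isB_dom (c : Char) (h : pvDomChar c = true) :
    pvIsB c = true ↔ (c = '\n' ∨ c = '\r') := by
  constructor
  · intro hb
    simp [pvIsB] at hb
    simp [pvDomChar] at h
    have h10 : c.toNat = 10 ∨ c.toNat = 13 := by omega
    rcases h10 with h10 | h10
    · left
      have := Char.ofNat_toNat c
      rw [h10] at this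
      exact this.symm
    · right
      have := Char.ofNat_toNat c
      rw [h10] at this
      exact this.symm
  · rintro (rfl | rfl) <;> decide

theorem pv_splitlines_eq_go (s : List Char) :
    PySem.Chars.splitlines s = PySem.Chars.splitlines.go pvIsB s [] [] := rfl

theorem pv_slgo_nil (isB : Char → Bool) (cur : List Char) (acc : List (List Char)) :
    PySem.Chars.splitlines.go isB [] cur acc =
      if cur.isEmpty then acc.reverse else (cur.reverse :: acc).reverse := rfl

theorem pv_slgo_rn (isB : Char → Bool) (rest cur : List Char) (acc : List (List Char)) :
    PySem.Chars.splitlines.go isB ('\r' :: '\n' :: rest) cur acc =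
      PySem.Chars.splitlines.go isB rest [] (cur.reverse :: acc) := rfl

theorem pv_slgo_cons (isB : Char → Bool) (c : Char) (rest cur : List Char) (acc : List (List Char))
    (h : ¬ (c = '\r' ∧ ∃ r', rest = '\n' :: r')) :
    PySem.Chars.splitlines.go isB (c :: rest) cur acc =
      if isB c then PySem.Chars.splitlines.go isB rest [] (cur.reverse :: acc)
      else PySem.Chars.splitlines.go isB rest (c :: cur) acc := by
  rw [PySem.Chars.splitlines.go.eq_def]
  split
  · rename_i heq; exact absurd heq (by simp)
  · rename_i r' heq
    injection heq with h1 h2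
    exact absurd ⟨h1, r', h2⟩ h
  · rename_i c' rest' _ heq
    injection heq with h1 h2
    subst h1; subst h2; rfl

theorem pv_list_strong {α : Type} (P : List α → Prop)
    (h : ∀ s : List α, (∀ t : List α, t.length < s.length → P t) → P s) (s : List α) : P s := by
  have key : ∀ (n : Nat) (s : List α), s.length ≤ n → P s := by
    intro n
    induction n with
    | zero => intro s hs; exact h s (fun t ht => absurd (Nat.lt_of_lt_of_le ht hs) (by omega))
    | succ n ihn => intro s hs; exact h s (fun t ht => ihn t (by omega))
  exact key s.length s le_rfl

theorem pv_len1 {α : Type} (c : α) (t : List α) : t.length < (c :: t).length := by simp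

theorem pv_len2 {α : Type} (c d : α) (t : List α) : t.length < (c :: d :: t).length := by simp

theorem pv_slgo_acc (isB : Char → Bool) (s : List Char) : ∀ (cur : List Char) (acc : List (List Char)),
    PySem.Chars.splitlines.go isB s cur acc = acc.reverse ++ PySem.Chars.splitlines.go isB s cur [] := by
  induction s using pv_list_strong with
  | _ s ih =>
    rcases s with _ | ⟨c, rest⟩
    · intro cur acc; by_cases h : cur.isEmpty <;> simp [pv_slgo_nil, h]
    · intro cur acc
      by_cases hrn : c = '\r' ∧ ∃ r', rest = '\n' :: r'
      · obtain ⟨rfl, r', rfl⟩ := hrn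
        rw [pv_slgo_rn, pv_slgo_rn, ih r' (pv_len2 _ _ _), ih r' (pv_len2 _ _ _) [] [cur.reverse]]
        simp
      · rw [pv_slgo_cons isB c rest cur acc hrn, pv_slgo_cons isB c rest cur [] hrn]
        by_cases hb : isB c
        · rw [if_pos hb, if_pos hb, ih rest (pv_len1 _ _), ih rest (pv_len1 _ _) [] [cur.reverse]]
          simp
        · rw [if_neg hb, if_neg hb, ih rest (pv_len1 _ _)]

-- the heart of the A side: tokenizing the lines = tokenizing the comment-stripped text
theorem pv_sl_inv (s : List Char) : ∀ (cur : List Char),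
    (∀ c ∈ s, pvDomChar c = true) → (∀ c ∈ cur, pvDomChar c = true) →
    '\n' ∉ cur → '\r' ∉ cur →
    (PySem.Chars.splitlines.go pvIsB s cur []).flatMap (fun l => PySem.Chars.split₀ (pvFrag l))
      = PySem.Chars.split₀ (pvSC (cur.reverse ++ s)) := by
  induction s using pv_list_strong with
  | _ s ih =>
    rcases s with _ | ⟨c, rest⟩
    · intro cur _ hcur hn hr
      have hcurR1 : '\n' ∉ cur.reverse := by simpa using hn
      have hcurR2 : '\r' ∉ cur.reverse := by simpa using hr
      rw [pv_slgo_nil]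
      by_cases h : cur.isEmpty
      · have : cur = [] := by simpa [List.isEmpty_iff] using h
        subst this
        simp [pvSC]
        rfl
      · rw [if_neg h]
        simp only [List.reverse_nil, List.append_nil, List.reverse_cons, List.nil_append,
          List.flatMap_cons, List.flatMap_nil, List.append_nil]
        rw [pv_frag_takeWhile, pv_sc_breakfree cur.reverse hcurR1 hcurR2]
    · intro cur hs hcur hn hr
      have hcurR1 : '\n' ∉ cur.reverse := by simpa using hn
      have hcurR2 : '\r' ∉ cur.reverse := by simpa using hr
      have hrest : ∀ x ∈ rest, pvDomChar x = true := fun x hx => hs x (List.mem_cons_of_mem c hx)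
      have hcdom : pvDomChar c = true := hs c List.mem_cons_self
      by_cases hrn : c = '\r' ∧ ∃ r', rest = '\n' :: r'
      · obtain ⟨rfl, r', rfl⟩ := hrn
        have hr' : ∀ x ∈ r', pvDomChar x = true := fun x hx => hrest x (by simp [hx])
        rw [pv_slgo_rn, pv_slgo_acc, List.flatMap_append,
          ih r' (pv_len2 _ _ _) [] hr' (by simp) (by simp) (by simp)]
        rw [pv_sc_line cur.reverse hcurR1 hcurR2 '\r' (Or.inr rfl) ('\n' :: r')]
        rw [pv_split₀_seam '\r' (by decide), pvSC, if_neg (by decide),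
          pv_split₀_ws_cons '\n' (by decide)]
        simp [pv_frag_takeWhile]
      · rw [pv_slgo_cons pvIsB c rest cur [] hrn]
        by_cases hb : pvIsB c
        · have hcnl : c = '\n' ∨ c = '\r' := (pv_isB_dom c hcdom).mp hb
          rw [if_pos hb, pv_slgo_acc, List.flatMap_append,
            ih rest (pv_len1 _ _) [] hrest (by simp) (by simp) (by simp)]
          rw [pv_sc_line cur.reverse hcurR1 hcurR2 c hcnl rest]
          have hws : PySem.Chars.isspace c = true := by
            rcases hcnl with rfl | rfl <;> decide
          rw [pv_split₀_seam c hws]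
          simp [pv_frag_takeWhile]
        · have hcnot : ¬ (c = '\n' ∨ c = '\r') := fun h => hb ((pv_isB_dom c hcdom).mpr h)
          rw [if_neg hb, ih rest (pv_len1 _ _) (c :: cur) hrest
            (by intro x hx; rcases List.mem_cons.mp hx with rfl | hx; exact hcdom; exact hcur x hx)
            (by intro h; rcases List.mem_cons.mp h with rfl | h; exact hcnot (Or.inl rfl); exact hn h)
            (by intro h; rcases List.mem_cons.mp h with rfl | h; exact hcnot (Or.inr rfl); exact hr h)]
          simp

theorem pv_A_eq_sc (s : List Char) (hs : ∀ c ∈ s, pvDomChar c = true) :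
    pvCharsA s = PySem.Chars.split₀ (pvSC s) := by
  rw [pvCharsA, pv_foldA, List.nil_append, pv_splitlines_eq_go]
  exact pv_sl_inv s [] hs (by simp) (by simp) (by simp)

-- ---- the B side equals split₀ ∘ pvSC (unconditionally) ----

theorem pv_sc_head_ws (s : List Char) :
    pvSCC s = [] ∨ ∃ c t, pvSCC s = c :: t ∧ PySem.Chars.isspace c = true := by
  induction s with
  | nil => exact Or.inl rfl
  | cons c rest ih =>
    by_cases h : c = '\n' ∨ c = '\r'
    · refine Or.inr ⟨c, pvSC rest, ?_, ?_⟩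
      · rw [pvSCC, if_pos h]
      · rcases h with rfl | rfl <;> decide
    · rw [pvSCC, if_neg h]; exact ih

theorem pv_flush_go (l : List Char)
    (hl : l = [] ∨ ∃ c t, l = c :: t ∧ PySem.Chars.isspace c = true)
    (toks : List (List Char)) (buf : List Char) :
    toks ++ PySem.Chars.split₀.go l buf.reverse [] =
      pvFlush toks buf ++ PySem.Chars.split₀.go l [] [] := by
  rcases hl with rfl | ⟨c, t, rfl, hc⟩
  · rw [pv_go_nil, pv_go_nil]
    by_cases h : buf.isEmpty
    · have : buf = [] := by simpa [List.isEmpty_iff] using h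
      subst this; simp [pvFlush]
    · have hrev : buf.reverse.isEmpty = false := by
        simp [List.isEmpty_iff] at h ⊢; exact h
      simp [hrev, pvFlush, h]
  · rw [pv_go_cons, pv_go_cons, if_pos hc, if_pos hc]
    by_cases h : buf.isEmpty
    · have : buf = [] := by simpa [List.isEmpty_iff] using h
      subst this; simp [pvFlush]
    · have hrev : buf.reverse.isEmpty = false := by
        simp [List.isEmpty_iff] at h ⊢; exact h
      rw [if_neg (by simp [hrev]), if_pos List.isEmpty_nil, pv_go_acc t [] [buf.reverse.reverse]]
      simp [pvFlush, h]

theorem pv_dfa_inv (s : List Char) :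
    (∀ (toks : List (List Char)) (buf : List Char),
      pvDFA toks buf false s = toks ++ PySem.Chars.split₀.go (pvSC s) buf.reverse []) ∧
    (∀ (toks : List (List Char)),
      pvDFA toks [] true s = toks ++ PySem.Chars.split₀.go (pvSCC s) [] []) := by
  induction s with
  | nil =>
    constructor
    · intro toks buf
      rw [pvDFA, pvSC, pv_go_nil]
      by_cases h : buf.isEmpty
      · have : buf = [] := by simpa [List.isEmpty_iff] using h
        subst this; simp [pvFlush]
      · have hrev : buf.reverse.isEmpty = false := by
          simp [List.isEmpty_iff] at h ⊢; exact h
        simp [hrev, pvFlush, h]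
    · intro toks
      rw [pvDFA, pvSCC, pv_go_nil]
      simp [pvFlush]
  | cons c rest ih =>
    constructor
    · intro toks buf
      by_cases hc : c = '#'
      · subst hc
        rw [pvDFA, if_pos rfl, ih.2 (pvFlush toks buf), pvSC, if_pos rfl]
        exact (pv_flush_go (pvSCC rest) (pv_sc_head_ws rest) toks buf).symm
      · by_cases hws : PySem.Chars.isspace c
        · rw [pvDFA, if_neg hc, if_pos hws, ih.1 (pvFlush toks buf) [], pvSC, if_neg hc,
            pv_go_cons, if_pos hws]
          by_cases h : buf.isEmpty
          · have : buf = [] := by simpa [List.isEmpty_iff] using h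
            subst this; simp [pvFlush]
          · have hrev : buf.reverse.isEmpty = false := by
              simp [List.isEmpty_iff] at h ⊢; exact h
            rw [if_neg (by simp [hrev]), pv_go_acc (pvSC rest) [] [buf.reverse.reverse]]
            simp [pvFlush, h]
        · rw [pvDFA, if_neg hc, if_neg hws, ih.1 toks (buf ++ [c]), pvSC, if_neg hc,
            pv_go_cons, if_neg hws]
          simp
    · intro toks
      by_cases hc : c = '\n' ∨ c = '\r'
      · rw [pvDFA, if_pos hc, ih.1 toks [], pvSCC, if_pos hc, pv_go_cons,
          if_pos (by rcases hc with rfl | rfl <;> decide)]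
        simp
      · rw [pvDFA, if_neg hc, ih.2 toks, pvSCC, if_neg hc]

theorem pv_B_eq_sc (s : List Char) :
    pvDFA [] [] false s = PySem.Chars.split₀ (pvSC s) := by
  rw [(pv_dfa_inv s).1 [] []]
  rfl

-- ---- lifting the ports to the List Char level ----

-- A's loop body, named (definitionally equal to the lambda in the port)
def pvStepS (tokens : List String) (line : String) : List String :=
  let line1 := if PySem.Str.isIn "#" line then ((PySem.Str.splitMax? line "#" 1).getD []).headD "" else line
  let line2 := PySem.Str.strip line1
  if line2 = "" then tokens else tokens ++ PySem.Str.split₀ line2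

theorem pv_fragS (line : List Char) :
    ((PySem.Str.splitMax? (String.ofList line) "#" 1).getD []).headD ""
      = String.ofList (pvFrag line) := by
  have h1 : PySem.Chars.splitMax? line ['#'] 1 = some (PySem.Chars.splitOnMax line ['#'] 1) := by
    simp [PySem.Chars.splitMax?]
  rw [pvFrag, PySem.Str.splitMax?, show ("#" : String).toList = ['#'] from rfl,
    String.toList_ofList, h1]
  cases PySem.Chars.splitOnMax line ['#'] 1 with
  | nil => rfl
  | cons a t => rfl

theorem pv_ofList_eq_empty (l : List Char) : (String.ofList l = "") = (l = []) := by
  apply propext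
  constructor
  · intro h; simpa using congrArg String.toList h
  · intro h; subst h; rfl

theorem pv_stepS (toks : List (List Char)) (line : List Char) :
    pvStepS (toks.map String.ofList) (String.ofList line) = (pvCharsStep toks line).map String.ofList := by
  have hIn : PySem.Str.isIn "#" (String.ofList line) = PySem.Chars.isIn ['#'] line := by
    rw [PySem.Str.isIn, show ("#" : String).toList = ['#'] from rfl, String.toList_ofList]
  have hStrip : ∀ l : List Char,
      PySem.Str.strip (String.ofList l) = String.ofList (PySem.Chars.strip l) := by
    intro l; rw [PySem.Str.strip, String.toList_ofList]
  have hSplit : ∀ l : List Char,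
      PySem.Str.split₀ (String.ofList l) = (PySem.Chars.split₀ l).map String.ofList := by
    intro l; rw [PySem.Str.split₀, String.toList_ofList]
  simp only [pvStepS, pvCharsStep, hIn, pv_fragS]
  have hl1 : (if PySem.Chars.isIn ['#'] line then String.ofList (pvFrag line) else String.ofList line)
      = String.ofList (if PySem.Chars.isIn ['#'] line then pvFrag line else line) := by
    by_cases h : PySem.Chars.isIn ['#'] line <;> simp [h]
  rw [hl1, hStrip]
  simp only [pv_ofList_eq_empty]
  by_cases h : PySem.Chars.strip (if PySem.Chars.isIn ['#'] line then pvFrag line else line) = [] <;>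
    simp [h, hSplit]

theorem pv_foldLift (cls : List (List Char)) : ∀ (ctoks : List (List Char)),
    (cls.map String.ofList).foldl pvStepS (ctoks.map String.ofList)
      = (cls.foldl pvCharsStep ctoks).map String.ofList := by
  induction cls with
  | nil => intro ctoks; rfl
  | cons c cls ih =>
    intro ctoks
    rw [List.map_cons, List.foldl_cons, List.foldl_cons, pv_stepS, ih]

theorem pv_portA (data : String) :
    tokenize_pgm_ascii_py data = (pvCharsA data.toList).map String.ofList := by
  have h0 : tokenize_pgm_ascii_py data = (PySem.Str.splitlines data).foldl pvStepS [] := rfl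
  rw [h0, PySem.Str.splitlines, pvCharsA]
  simpa using pv_foldLift (PySem.Chars.splitlines data.toList) []

-- B's fold step, named (definitionally equal to the lambda in the port)
def pvStepB (st : List String × List Char × Bool) (c : Char) : List String × List Char × Bool :=
  let tokens := st.1
  let buf := st.2.1
  let inComment := st.2.2
  if inComment then
    if c = '\n' ∨ c = '\r' then (tokens, buf, false) else (tokens, buf, true)
  else if c = '#' then
    ((if buf.isEmpty then tokens else tokens ++ [String.ofList buf]), [], true)
  else if PySem.Chars.isspace c then
    ((if buf.isEmpty then tokens else tokens ++ [String.ofList buf]), [], false)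
  else (tokens, buf ++ [c], inComment)

theorem pv_liftB (s : List Char) : ∀ (toks : List (List Char)) (buf : List Char) (inC : Bool),
    (let st := s.foldl pvStepB (toks.map String.ofList, buf, inC)
     if st.2.1.isEmpty then st.1 else st.1 ++ [String.ofList st.2.1])
      = (pvDFA toks buf inC s).map String.ofList := by
  induction s with
  | nil =>
    intro toks buf inC
    rw [List.foldl_nil]
    cases inC <;>
    · rw [pvDFA, pvFlush]
      by_cases h : buf.isEmpty <;> simp [h]
  | cons c rest ih =>
    intro toks buf inC
    rw [List.foldl_cons]
    cases inC with
    | true =>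
      by_cases hc : c = '\n' ∨ c = '\r'
      · rw [show pvStepB (toks.map String.ofList, buf, true) c = (toks.map String.ofList, buf, false) from by
          simp [pvStepB, hc], pvDFA, if_pos hc]
        exact ih toks buf false
      · rw [show pvStepB (toks.map String.ofList, buf, true) c = (toks.map String.ofList, buf, true) from by
          simp [pvStepB, hc], pvDFA, if_neg hc]
        exact ih toks buf true
    | false =>
      by_cases hc : c = '#'
      · subst hc
        rw [show pvStepB (toks.map String.ofList, buf, false) '#'
            = ((if buf.isEmpty then toks.map String.ofList else toks.map String.ofList ++ [String.ofList buf]), [], true) from by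
          simp [pvStepB], pvDFA, if_pos rfl]
        have hfl : (if buf.isEmpty then toks.map String.ofList else toks.map String.ofList ++ [String.ofList buf])
            = (pvFlush toks buf).map String.ofList := by
          by_cases h : buf.isEmpty <;> simp [pvFlush, h]
        rw [hfl]
        exact ih (pvFlush toks buf) [] true
      · by_cases hws : PySem.Chars.isspace c
        · rw [show pvStepB (toks.map String.ofList, buf, false) c
              = ((if buf.isEmpty then toks.map String.ofList else toks.map String.ofList ++ [String.ofList buf]), [], false) from by
            simp [pvStepB, hc, hws], pvDFA, if_neg hc, if_pos hws]
          have hfl : (if buf.isEmpty then toks.map String.ofList else toks.map String.ofList ++ [String.ofList buf])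
              = (pvFlush toks buf).map String.ofList := by
            by_cases h : buf.isEmpty <;> simp [pvFlush, h]
          rw [hfl]
          exact ih (pvFlush toks buf) [] false
        · rw [show pvStepB (toks.map String.ofList, buf, false) c
              = (toks.map String.ofList, buf ++ [c], false) from by
            simp [pvStepB, hc, hws], pvDFA, if_neg hc, if_neg hws]
          exact ih toks (buf ++ [c]) false

theorem pv_portB (data : String) :
    tokenize_pgm_ascii_py_alt data = (pvDFA [] [] false data.toList).map String.ofList := by
  have h0 : tokenize_pgm_ascii_py_alt data =
      (let st := data.toList.foldl pvStepB ([], [], false)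
       if st.2.1.isEmpty then st.1 else st.1 ++ [String.ofList st.2.1]) := rfl
  rw [h0]
  exact pv_liftB data.toList [] [] false

-- ===== VERDICT (by name: the statement is the Claim_ definition above) =====
theorem tokenize_pgm_ascii_py_spec : Claim_equal_tokenize_pgm_ascii_py := by
  intro data hdom
  unfold Spec_tokenize_pgm_ascii_py
  have hs : ∀ c ∈ data.toList, pvDomChar c = true := by
    have := hdom
    unfold Dom_tokenize_pgm_ascii_py pvDomStr at this
    simpa [List.all_eq_true] using this
  rw [pv_portA, pv_portB, pv_A_eq_sc data.toList hs, pv_B_eq_sc]
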